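-- pv_equiv track=rewrite | github.com/stanford-futuredata/ARES | ares/RAG_Automatic_Evaluation/Prepare_KILT_Dataset.py | join_wikipedia_passages_by_paragraph
-- ===== SOURCE A (Python) =====
-- def join_wikipedia_passages_by_paragraph(given_paragraph_sections, given_paragraph_ids):
--
--     collected_paragraphs = []
--     current_id = given_paragraph_ids[0]
--     current_text = ""
--
--     assert len(given_paragraph_sections) == len(given_paragraph_ids)
--     for given_paragraph, given_paragraph_id in zip(given_paragraph_sections, given_paragraph_ids):
--         if current_id == given_paragraph_id:
--             current_text += given_paragraph + " "
--         else:
--             current_text = current_text.strip()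
--             collected_paragraphs.append(current_text)
--
--             current_text = ""
--             current_id = given_paragraph_id
--             current_text += given_paragraph + " "
--
--     current_text = current_text.strip()
--     collected_paragraphs.append(current_text)
--
--     return collected_paragraphs
-- ===== SOURCE B (Python) =====
-- def join_wikipedia_passages_by_paragraph(given_paragraph_sections, given_paragraph_ids):
--     n = len(given_paragraph_ids)
--     assert len(given_paragraph_sections) == n
--     # Stage 1: compute cut positions from the ids alone (boundaries between runs).
--     cuts = [0] + [k + 1
--                   for k, (x, y) in enumerate(zip(given_paragraph_ids, given_paragraph_ids[1:]))
--                   if x != y] + [n]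
--     # Stage 2: slice the sections at those cuts and join each block.
--     return [" ".join(given_paragraph_sections[a:b]).strip()
--             for a, b in zip(cuts, cuts[1:])]
-- ===== Notes on version B (the rewrite author's own statement) =====
-- stated objective: alternative
-- what changed: Two staged passes replace A's streaming buffer/flush loop: first compute the list of cut indices from the ids alone (positions where consecutive ids differ), then slice the sections list at those cuts and emit ' '.join(slice).strip() per interval; no running text accumulator exists.
import Mathlib
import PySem

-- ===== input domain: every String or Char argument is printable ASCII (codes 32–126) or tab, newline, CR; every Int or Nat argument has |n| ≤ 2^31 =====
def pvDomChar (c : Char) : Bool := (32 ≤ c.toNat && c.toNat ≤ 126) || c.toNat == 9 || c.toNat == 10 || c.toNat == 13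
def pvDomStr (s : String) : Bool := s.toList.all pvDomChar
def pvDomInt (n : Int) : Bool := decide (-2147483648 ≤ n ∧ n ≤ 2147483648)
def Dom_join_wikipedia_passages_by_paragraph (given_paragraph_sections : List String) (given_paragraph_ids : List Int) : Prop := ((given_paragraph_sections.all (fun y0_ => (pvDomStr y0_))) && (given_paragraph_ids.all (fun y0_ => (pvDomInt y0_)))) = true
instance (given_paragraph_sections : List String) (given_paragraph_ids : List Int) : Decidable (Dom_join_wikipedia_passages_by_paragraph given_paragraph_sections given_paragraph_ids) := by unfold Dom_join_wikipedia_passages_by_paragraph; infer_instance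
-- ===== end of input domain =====

-- B replaces A's streaming text-buffer/flush loop by two staged passes: first the list of
-- cut indices where consecutive ids differ, then one " ".join(slice).strip() per cut interval.

-- ===== PORT A =====
-- A's loop body: state = (collected_paragraphs, current_id, current_text)
def pvStepA (st : List String × Int × String) (p : String × Int) : List String × Int × String :=
  if st.2.1 == p.2 then (st.1, st.2.1, st.2.2 ++ p.1 ++ " ")
  else (st.1 ++ [PySem.Str.strip st.2.2], p.2, p.1 ++ " ")

def join_wikipedia_passages_by_paragraph (given_paragraph_sections : List String) (given_paragraph_ids : List Int) : List String :=
  match given_paragraph_ids with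
  | [] => []  -- Python: given_paragraph_ids[0] raises IndexError here (outside Pre_)
  | i0 :: _ =>
    let st := (given_paragraph_sections.zip given_paragraph_ids).foldl pvStepA ([], i0, "")
    st.1 ++ [PySem.Str.strip st.2.2]

-- ===== PORT B =====
def join_wikipedia_passages_by_paragraph_alt (given_paragraph_sections : List String) (given_paragraph_ids : List Int) : List String :=
  let n : Int := given_paragraph_ids.length
  -- cuts = [0] + [k+1 for k,(x,y) in enumerate(zip(ids, ids[1:])) if x != y] + [n]
  let cuts : List Int :=
    [0] ++ ((PySem.List.enumerate (given_paragraph_ids.zip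
               (PySem.List.slice given_paragraph_ids (some 1) none)) 0).filterMap
             (fun kp => if kp.2.1 ≠ kp.2.2 then some (kp.1 + 1) else none)) ++ [n]
  -- [" ".join(sections[a:b]).strip() for a,b in zip(cuts, cuts[1:])]
  (cuts.zip cuts.tail).map
    (fun ab => PySem.Str.strip (PySem.Str.join " " (PySem.List.slice given_paragraph_sections (some ab.1) (some ab.2))))

-- ===== PRECONDITION & SPEC =====
-- Pre_ excludes exactly the inputs where the Python A raises: empty ids (IndexError on
-- given_paragraph_ids[0]) and mismatched lengths (AssertionError); A returns everywhere on Pre_.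
def Pre_join_wikipedia_passages_by_paragraph (given_paragraph_sections : List String) (given_paragraph_ids : List Int) : Prop :=
  given_paragraph_ids ≠ [] ∧ given_paragraph_sections.length = given_paragraph_ids.length
instance (given_paragraph_sections : List String) (given_paragraph_ids : List Int) : Decidable (Pre_join_wikipedia_passages_by_paragraph given_paragraph_sections given_paragraph_ids) := by unfold Pre_join_wikipedia_passages_by_paragraph; infer_instance

def pvWitness_join_wikipedia_passages_by_paragraph : List String × List Int := (["alpha", "beta", "gamma"], [1, 1, 2])

def Spec_join_wikipedia_passages_by_paragraph (given_paragraph_sections : List String) (given_paragraph_ids : List Int) (out : List String) : Prop := out = join_wikipedia_passages_by_paragraph_alt given_paragraph_sections given_paragraph_ids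
instance (given_paragraph_sections : List String) (given_paragraph_ids : List Int) (out : List String) : Decidable (Spec_join_wikipedia_passages_by_paragraph given_paragraph_sections given_paragraph_ids out) := by unfold Spec_join_wikipedia_passages_by_paragraph; infer_instance

-- ===== CLAIM (what is proved, stated in full; the proofs are below) =====
def Claim_equal_join_wikipedia_passages_by_paragraph : Prop := ∀ (given_paragraph_sections : List String) (given_paragraph_ids : List Int), Dom_join_wikipedia_passages_by_paragraph given_paragraph_sections given_paragraph_ids → Pre_join_wikipedia_passages_by_paragraph given_paragraph_sections given_paragraph_ids → Spec_join_wikipedia_passages_by_paragraph given_paragraph_sections given_paragraph_ids (join_wikipedia_passages_by_paragraph given_paragraph_sections given_paragraph_ids)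

-- ===== LEMMAS AND PROOFS =====

-- canonical grouping of the zipped pairs into maximal runs of consecutive equal ids
def pvRunsAux (cid : Int) (acc : List String) : List (String × Int) → List (List String)
  | [] => [acc.reverse]
  | (s, i) :: rest =>
    if i == cid then pvRunsAux cid (s :: acc) rest
    else acc.reverse :: pvRunsAux i [s] rest

def pvGroupJoin (g : List String) : String := PySem.Str.strip (PySem.Str.join " " g)

-- break positions: pvBreaks p c l = positions (starting at c) where the id changes, prev id p
def pvBreaks (p : Int) (c : Int) : List Int → List Int
  | [] => []
  | i :: r => (if p ≠ i then [c] else []) ++ pvBreaks i (c + 1) r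

-- B's second stage, as a named function of the cut list
def pvIntervals (secs : List String) (cuts : List Int) : List String :=
  (cuts.zip cuts.tail).map
    (fun ab => PySem.Str.strip (PySem.Str.join " " (PySem.List.slice secs (some ab.1) (some ab.2))))

lemma pv_rstrip_space (l : List Char) : PySem.Chars.rstrip (l ++ [' ']) = PySem.Chars.rstrip l := by
  simp [PySem.Chars.rstrip, show PySem.Chars.isspace ' ' = true from by decide]

lemma pv_strip_space (l : List Char) : PySem.Chars.strip (l ++ [' ']) = PySem.Chars.strip l := by
  simp only [PySem.Chars.strip, PySem.Chars.lstrip]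
  rw [List.dropWhile_append]
  by_cases h : (List.dropWhile PySem.Chars.isspace l).isEmpty
  · simp [show List.dropWhile PySem.Chars.isspace [' '] = [] from by decide,
      PySem.Chars.rstrip, List.isEmpty_iff.mp h]
  · simp only [h, Bool.false_eq_true, if_false]
    exact pv_rstrip_space _

lemma pv_flatMap_join (ls : List (List Char)) (h : ls ≠ []) :
    ls.flatMap (fun x => x ++ [' ']) = PySem.Chars.join [' '] ls ++ [' '] := by
  induction ls with
  | nil => exact absurd rfl h
  | cons x r ih =>
    cases r with
    | nil => simp [PySem.Chars.join_singleton]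
    | cons y r' =>
      rw [PySem.Chars.join_cons_cons]
      simp only [List.flatMap_cons] at *
      rw [ih (by simp)]
      simp

lemma pv_strip_flatMap (ls : List (List Char)) :
    PySem.Chars.strip (ls.flatMap (fun x => x ++ [' '])) = PySem.Chars.strip (PySem.Chars.join [' '] ls) := by
  cases ls with
  | nil => simp [PySem.Chars.join_nil]
  | cons x r => rw [pv_flatMap_join _ (by simp), pv_strip_space]

lemma pv_strip_eq (t : String) (acc : List String)
    (h : t.toList = acc.reverse.flatMap (fun s => s.toList ++ [' '])) :
    PySem.Str.strip t = pvGroupJoin acc.reverse := by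
  apply String.toList_inj.mp
  rw [PySem.Str.toList_strip, h, pvGroupJoin, PySem.Str.toList_strip, PySem.Str.toList_join]
  have h2 : acc.reverse.flatMap (fun s => s.toList ++ [' '])
      = (acc.reverse.map String.toList).flatMap (fun x => x ++ [' ']) := by
    rw [List.flatMap_map]
  rw [h2, pv_strip_flatMap]
  rfl

-- A's fold equals the canonical runs decomposition
lemma pv_loop (ps : List (String × Int)) : ∀ (done : List String) (cid : Int) (t : String) (acc : List String),
    t.toList = acc.reverse.flatMap (fun s => s.toList ++ [' ']) →
    (ps.foldl pvStepA (done, cid, t)).1 ++ [PySem.Str.strip (ps.foldl pvStepA (done, cid, t)).2.2]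
      = done ++ (pvRunsAux cid acc ps).map pvGroupJoin := by
  induction ps with
  | nil =>
    intro done cid t acc h
    simp only [List.foldl_nil, pvRunsAux, List.map_cons, List.map_nil]
    rw [pv_strip_eq t acc h]
  | cons p rest ih =>
    intro done cid t acc h
    obtain ⟨s, i⟩ := p
    simp only [List.foldl_cons, pvStepA, pvRunsAux]
    by_cases hc : cid = i
    · simp only [hc, beq_self_eq_true, if_true]
      rw [ih done i (t ++ s ++ " ") (s :: acc) (by
        simp [String.toList_append, h, show (" " : String).toList = [' '] from by decide])]
    · have h1 : (cid == i) = false := by simp [hc]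
      have h2 : (i == cid) = false := by simp [Ne.symm hc]
      simp only [h1, h2, Bool.false_eq_true, if_false, List.map_cons]
      rw [ih (done ++ [PySem.Str.strip t]) i (s ++ " ") [s] (by
        simp [String.toList_append, show (" " : String).toList = [' '] from by decide])]
      rw [pv_strip_eq t acc h, List.append_assoc]
      rfl

-- a slice at the exact position of a block recovers the block
lemma pv_slice_prefix (pre mid post : List String) :
    PySem.List.slice (pre ++ mid ++ post) (some (pre.length : Int))
      (some ((pre.length : Int) + (mid.length : Int))) = mid := by
  rw [PySem.List.slice_natCast_add]
  rw [List.append_assoc, List.drop_left, List.take_left]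

-- the port's enumerate/filterMap cut computation equals pvBreaks
lemma pv_cuts_eq (l : List Int) : ∀ (p s : Int),
    (PySem.List.enumerate ((p :: l).zip l) s).filterMap
        (fun kp => if kp.2.1 ≠ kp.2.2 then some (kp.1 + 1) else none)
      = pvBreaks p (s + 1) l := by
  induction l with
  | nil => intro p s; simp [pvBreaks]
  | cons i r ih =>
    intro p s
    rw [List.zip_cons_cons, PySem.List.enumerate_cons, List.filterMap_cons]
    by_cases hp : p = i
    · simp only [hp, ne_eq, not_true_eq_false, if_false, pvBreaks, ite_self,
        List.nil_append]
      simpa using ih i (s + 1)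
    · simp only [ne_eq, hp, not_false_eq_true, if_true, pvBreaks]
      rw [ih i (s + 1)]
      rfl

lemma pv_intervals_cons (secs : List String) (a b : Int) (rest : List Int) :
    pvIntervals secs (a :: b :: rest)
      = PySem.Str.strip (PySem.Str.join " " (PySem.List.slice secs (some a) (some b)))
          :: pvIntervals secs (b :: rest) := by
  rfl

-- MAIN: the runs decomposition equals B's slice-at-cuts decomposition
lemma pv_runs_intervals : ∀ (pairs : List (String × Int)) (i0 : Int) (acc pre : List String),
    (pvRunsAux i0 acc pairs).map pvGroupJoin
      = pvIntervals (pre ++ acc.reverse ++ pairs.map Prod.fst)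
          ((pre.length : Int) ::
            (pvBreaks i0 ((pre.length : Int) + (acc.length : Int)) (pairs.map Prod.snd)
              ++ [(pre.length : Int) + (acc.length : Int) + (pairs.length : Int)])) := by
  intro pairs
  induction pairs with
  | nil =>
    intro i0 acc pre
    simp only [pvRunsAux, List.map_cons, List.map_nil, pvBreaks, List.nil_append,
      List.length_nil, Nat.cast_zero, add_zero]
    rw [pv_intervals_cons]
    have : PySem.List.slice (pre ++ acc.reverse ++ ([] : List String))
        (some (pre.length : Int)) (some ((pre.length : Int) + (acc.length : Int))) = acc.reverse := by
      have := pv_slice_prefix pre acc.reverse []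
      simpa using this
    simp only [List.append_nil] at this ⊢
    rw [this]
    rfl
  | cons p rest ih =>
    intro i0 acc pre
    obtain ⟨s, i⟩ := p
    simp only [List.map_cons, List.length_cons]
    by_cases hi : i = i0
    · -- same run continues
      simp only [pvRunsAux, hi, beq_self_eq_true, if_true, pvBreaks, ne_eq,
        not_true_eq_false, if_false, List.nil_append]
      have h := ih i0 (s :: acc) pre
      simp only [List.reverse_cons, List.length_cons] at h
      rw [h]
      have e1 : pre ++ (acc.reverse ++ [s]) ++ rest.map Prod.fst
          = pre ++ acc.reverse ++ (s :: rest.map Prod.fst) := by simp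
      have e2 : (pre.length : Int) + ((acc.length + 1 : Nat) : Int)
          = (pre.length : Int) + (acc.length : Int) + 1 := by push_cast; ring
      have e3 : (pre.length : Int) + ((acc.length + 1 : Nat) : Int) + (rest.length : Int)
          = (pre.length : Int) + (acc.length : Int) + ((rest.length + 1 : Nat) : Int) := by
        push_cast; ring
      rw [e1, e3, e2]
    · -- run boundary
      have hbeq : (i == i0) = false := by simp [hi]
      have hne : i0 ≠ i := Ne.symm hi
      simp only [pvRunsAux, hbeq, Bool.false_eq_true, if_false, pvBreaks, ne_eq, hne,
        not_false_eq_true, if_true, List.map_cons, List.cons_append]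
      rw [pv_intervals_cons]
      refine congrArg₂ List.cons ?_ ?_
      · -- head: the flushed run
        have : PySem.List.slice (pre ++ acc.reverse ++ (s :: rest.map Prod.fst))
            (some (pre.length : Int)) (some ((pre.length : Int) + (acc.length : Int)))
            = acc.reverse := by
          have := pv_slice_prefix pre acc.reverse (s :: rest.map Prod.fst)
          simpa using this
        rw [this]
        rfl
      · -- tail: restart with acc = [s], pre grows by the flushed run
        have h := ih i [s] (pre ++ acc.reverse)
        simp only [List.reverse_cons, List.reverse_nil, List.nil_append, List.length_append,
          List.length_reverse, List.length_cons, List.length_nil] at h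
        rw [h]
        have e1 : pre ++ acc.reverse ++ [s] ++ rest.map Prod.fst
            = pre ++ acc.reverse ++ (s :: rest.map Prod.fst) := by simp
        have e2 : ((pre.length + acc.length : Nat) : Int)
            = (pre.length : Int) + (acc.length : Int) := by push_cast; ring
        have e3 : ((pre.length + acc.length : Nat) : Int) + ((0 + 1 : Nat) : Int)
            = (pre.length : Int) + (acc.length : Int) + 1 := by push_cast; ring
        have e4 : ((pre.length + acc.length : Nat) : Int) + ((0 + 1 : Nat) : Int) + (rest.length : Int)
            = (pre.length : Int) + (acc.length : Int) + ((rest.length + 1 : Nat) : Int) := by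
          push_cast; ring
        rw [e1, e4, e3, e2]
        simp

-- ===== VERDICT (by name: the statement is the Claim_ definition above) =====
theorem join_wikipedia_passages_by_paragraph_spec : Claim_equal_join_wikipedia_passages_by_paragraph := by
  intro secs ids _dom hpre
  obtain ⟨hne, hlen⟩ := hpre
  unfold Spec_join_wikipedia_passages_by_paragraph
  cases ids with
  | nil => exact absurd rfl hne
  | cons i0 ids' =>
    cases secs with
    | nil => simp at hlen
    | cons s0 secs' =>
      have hlen' : secs'.length = ids'.length := by simpa using hlen
      -- A's side: fold = runs
      unfold join_wikipedia_passages_by_paragraph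
      simp only [List.zip_cons_cons, List.foldl_cons, pvStepA, beq_self_eq_true, if_true]
      rw [pv_loop (secs'.zip ids') [] i0 ("" ++ s0 ++ " ") [s0] (by
        simp [String.toList_append, show (" " : String).toList = [' '] from by decide])]
      -- B's side: port = pvIntervals at pvBreaks-cuts
      unfold join_wikipedia_passages_by_paragraph_alt
      rw [show PySem.List.slice (i0 :: ids') (some 1) none = ids' from PySem.List.slice_from_one _]
      rw [pv_cuts_eq ids' i0 0]
      -- runs = intervals
      have h := pv_runs_intervals (secs'.zip ids') i0 [s0] []
      simp only [List.length_nil, Nat.cast_zero, List.reverse_cons, List.reverse_nil,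
        List.nil_append, List.length_cons, Nat.cast_one, zero_add,
        List.map_fst_zip (le_of_eq hlen'), List.map_snd_zip (le_of_eq hlen'.symm),
        List.length_zip, hlen', min_self] at h
      rw [h]
      have : ((ids'.length + 1 : Nat) : Int) = 1 + (ids'.length : Int) := by push_cast; ring
      simp only [List.length_cons, this, List.nil_append, List.singleton_append]
      simp only [pvIntervals, zero_add, List.cons_append]
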